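-- pv_equiv track=rewrite | github.com/LouisCatala/CCC_2 | create_invoice.py | create_qty_list
-- ===== SOURCE A (Python) =====
-- def create_qty_list(txt_items, qty_list):  #Remove all () in string and update string_list, and modify/create qty_list
--     updated_txt_items = []
--
--     for txt in txt_items:
--         # Find the first occurrence of '()' and extract the number
--         if '(' in txt and ')' in txt:
--             start = txt.find('(') + 1
--             end = txt.find(')', start)
--             number = int(txt[start:end])
--             qty_list.append(number)
--
--             # Remove the first '()' and its contents from the string
--             txt = txt[:start-1] + txt[end+1:]
--
--         # Remove all other occurrences of '()' and its contents
--         while '(' in txt and ')' in txt: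
--             start = txt.find('(')
--             end = txt.find(')', start) + 1
--             txt = txt[:start] + txt[end:]
--
--         updated_txt_items.append(txt.strip())
--
--     return updated_txt_items
-- ===== SOURCE B (Python) =====
-- # B: a single left-to-right scan per string (A instead rescans and rebuilds the string once per group).
-- # Like A, appends the first parenthesized number of each string to qty_list (in-place mutation).
-- def _strip_parens(txt, qty_list):
--     out = []
--     first = True
--     i, n = 0, len(txt)
--     while i < n:
--         ch = txt[i]
--         if ch == '(':
--             j = txt.find(')', i + 1)
--             if j != -1:
--                 if first:
--                     qty_list.append(int(txt[i + 1:j]))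
--                     first = False
--                 i = j + 1
--                 continue
--         out.append(ch)
--         i += 1
--     return ''.join(out)
--
-- def create_qty_list(txt_items, qty_list):
--     return [(_strip_parens(t, qty_list) if '(' in t and ')' in t else t).strip() for t in txt_items]
-- ===== Notes on version B (the rewrite author's own statement) =====
-- stated objective: alternative
-- what changed: A repeatedly rescans and rebuilds the whole string (find + slice-concatenation once per parenthesized group); B makes a single left-to-right scan over each string, skipping each parenthesized region via the next ')' and collecting the kept characters once.
-- outside the precondition, e.g. on create_qty_list(['(1)a('], []): A returns ['a('], B returns ['a(']
import Mathlib
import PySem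

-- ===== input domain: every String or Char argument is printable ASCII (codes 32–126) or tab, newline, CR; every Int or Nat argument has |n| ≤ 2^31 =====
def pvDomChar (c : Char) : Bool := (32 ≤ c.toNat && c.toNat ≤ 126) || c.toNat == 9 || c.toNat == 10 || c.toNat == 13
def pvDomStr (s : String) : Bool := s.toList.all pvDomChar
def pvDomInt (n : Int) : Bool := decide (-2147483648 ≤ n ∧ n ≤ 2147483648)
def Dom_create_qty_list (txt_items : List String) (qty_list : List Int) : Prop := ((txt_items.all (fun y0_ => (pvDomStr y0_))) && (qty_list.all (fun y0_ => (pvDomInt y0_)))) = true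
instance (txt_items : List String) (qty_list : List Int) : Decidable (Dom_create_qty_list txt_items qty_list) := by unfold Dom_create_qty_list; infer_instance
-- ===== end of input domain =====

-- B replaces A's repeated find-and-rebuild passes by a single left-to-right scan per string; equivalence
-- is about the RETURN value only (both Pythons also append the first parenthesized number of each
-- string to qty_list in place; that mutation is not part of the return value and is not modeled here).

-- ===== PORT A =====
-- A's inner while-loop can diverge in Python (when a '(' has no ')' at or after it, txt[:start]+txt[end:]
-- with end = 0 never shrinks); it is ported with fuel = current length: inside Pre_ every iteration
-- removes at least one character, so the fuel is never exhausted there.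
def pvWhileA : Nat → List Char → List Char
  | 0, cs => cs
  | fuel+1, cs =>
    if PySem.Chars.isIn ['('] cs && PySem.Chars.isIn [')'] cs then
      let start : Int := PySem.Chars.find cs ['(']
      let e : Int := PySem.Chars.findFrom cs [')'] start + 1
      pvWhileA fuel (PySem.Chars.slice cs none (some start) ++ PySem.Chars.slice cs (some e) none)
    else cs

-- body of A's for-loop for one txt (the computed number int(txt[start:end]) only mutates qty_list,
-- which is not part of the return value; Pre_ guarantees it parses, i.e. Python does not raise)
def pvStepA (s : String) : String :=
  let cs := s.toList
  let cs1 := if PySem.Chars.isIn ['('] cs && PySem.Chars.isIn [')'] cs then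
      let start : Int := PySem.Chars.find cs ['('] + 1
      let e : Int := PySem.Chars.findFrom cs [')'] start
      PySem.Chars.slice cs none (some (start - 1)) ++ PySem.Chars.slice cs (some (e + 1)) none
    else cs
  String.ofList (PySem.Chars.strip (pvWhileA cs1.length cs1))

def create_qty_list (txt_items : List String) (qty_list : List Int) : List String :=
  txt_items.foldl (fun acc txt => acc ++ [pvStepA txt]) []

-- ===== PORT B =====
-- Source B's index loop over txt, as structural recursion on the character list: copy each character,
-- except that a '(' with a ')' somewhere after it skips everything up to and including that ')'.
def pvScanB : List Char → List Char
  | [] => []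
  | c :: rest =>
    if c = '(' then
      let j := PySem.Chars.find rest [')']
      if j = -1 then c :: pvScanB rest else pvScanB (rest.drop (j.toNat + 1))
    else c :: pvScanB rest
termination_by cs => cs.length
decreasing_by
  all_goals simp

def pvStepB (s : String) : String :=
  let cs := s.toList
  String.ofList (PySem.Chars.strip (if PySem.Chars.isIn ['('] cs && PySem.Chars.isIn [')'] cs then pvScanB cs else cs))

def create_qty_list_alt (txt_items : List String) (qty_list : List Int) : List String :=
  txt_items.map pvStepB

-- ===== PRECONDITION & SPEC =====
-- every '(' of the string is followed by some ')' later in the string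
def pvParOK : List Char → Bool
  | [] => true
  | c :: rest => (!(c = '(') || rest.contains ')') && pvParOK rest

-- Pre_ excludes (i) strings whose first parenthesized content is not a valid int — there Python A
-- raises ValueError — and (ii) malformed strings containing a '(' with no later ')' — there A's
-- while-loop almost always diverges (or int() raises); in the rare cases such a string still lets A
-- return (the unmatched '(' is only reached after every remaining ')' is gone), B returns the same
-- value anyway, see the cite in claim.json.
def pvGood (s : String) : Bool :=
  let cs := s.toList
  let p : Int := PySem.Chars.find cs ['(']
  let q : Int := PySem.Chars.findFrom cs [')'] (p + 1)
  !(PySem.Chars.isIn ['('] cs && PySem.Chars.isIn [')'] cs) ||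
    (pvParOK cs && (PySem.Int.ofChars? (PySem.Chars.slice cs (some (p + 1)) (some q))).isSome)

def Pre_create_qty_list (txt_items : List String) (qty_list : List Int) : Prop :=
  ∀ s ∈ txt_items, pvGood s = true

instance (txt_items : List String) (qty_list : List Int) : Decidable (Pre_create_qty_list txt_items qty_list) := by
  unfold Pre_create_qty_list; infer_instance

def pvWitness_create_qty_list : List String × List Int := (["apples (2) kg", "pear(3)(big)"], [5])

def Spec_create_qty_list (txt_items : List String) (qty_list : List Int) (out : List String) : Prop := out = create_qty_list_alt txt_items qty_list
instance (txt_items : List String) (qty_list : List Int) (out : List String) : Decidable (Spec_create_qty_list txt_items qty_list out) := by unfold Spec_create_qty_list; infer_instance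

-- ===== CLAIM (what is proved, stated in full; the proofs are below) =====
def Claim_equal_create_qty_list : Prop := ∀ (txt_items : List String) (qty_list : List Int), Dom_create_qty_list txt_items qty_list → Pre_create_qty_list txt_items qty_list → Spec_create_qty_list txt_items qty_list (create_qty_list txt_items qty_list)

-- ===== LEMMAS AND PROOFS =====

theorem pv_isIn_singleton (c : Char) (cs : List Char) :
    PySem.Chars.isIn [c] cs = true ↔ c ∈ cs := by
  rw [PySem.Chars.isIn_iff_infix, List.singleton_infix_iff]

theorem pv_scan_no_open (cs : List Char) (h : '(' ∉ cs) : pvScanB cs = cs := by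
  induction cs with
  | nil => simp [pvScanB]
  | cons c rest ih =>
    simp only [List.mem_cons, not_or] at h
    have hc : ¬ c = '(' := fun e => h.1 e.symm
    simp [pvScanB, hc, ih h.2]

theorem pv_scan_append (pre z : List Char) (h : '(' ∉ pre) :
    pvScanB (pre ++ z) = pre ++ pvScanB z := by
  induction pre with
  | nil => simp
  | cons c pre ih =>
    simp only [List.mem_cons, not_or] at h
    have hc : ¬ c = '(' := fun e => h.1 e.symm
    simp [pvScanB, hc, ih h.2]

theorem pv_parOK_append (pre z : List Char) (h : '(' ∉ pre) :
    pvParOK (pre ++ z) = pvParOK z := by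
  induction pre with
  | nil => simp
  | cons c pre ih =>
    simp only [List.mem_cons, not_or] at h
    have hc : ¬ c = '(' := fun e => h.1 e.symm
    simp [pvParOK, hc, ih h.2]

theorem pv_parOK_tail (c : Char) (rest : List Char) (h : pvParOK (c :: rest) = true) :
    pvParOK rest = true := by
  simp [pvParOK] at h; exact h.2

theorem pv_parOK_drop (cs : List Char) (k : Nat) (h : pvParOK cs = true) :
    pvParOK (cs.drop k) = true := by
  induction k generalizing cs with
  | zero => simpa using h
  | succ k ih =>
    cases cs with
    | nil => simpa using h
    | cons c rest => exact ih rest (pv_parOK_tail c rest h)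

-- find points at the first '('
theorem pv_find_open (cs : List Char) (h : PySem.Chars.isIn ['('] cs = true) :
    ∃ p : Nat, cs.drop p = '(' :: cs.drop (p + 1) ∧ '(' ∉ cs.take p ∧
      PySem.Chars.find cs ['('] = (p : Int) := by
  have hinf : ['('] <:+: cs := (PySem.Chars.isIn_iff_infix _ _).1 h
  have hnn : 0 ≤ PySem.Chars.find cs ['('] := (PySem.Chars.find_nonneg_iff _ _).2 hinf
  obtain ⟨hpre, hmin⟩ := PySem.Chars.find_spec hnn
  refine ⟨(PySem.Chars.find cs ['(']).toNat, ?_, ?_, (Int.toNat_of_nonneg hnn).symm⟩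
  · obtain ⟨t, ht⟩ := hpre
    have hdrop1 : cs.drop ((PySem.Chars.find cs ['(']).toNat + 1)
        = (cs.drop (PySem.Chars.find cs ['(']).toNat).tail := by
      rw [← List.drop_drop]; simp
    rw [hdrop1, ← ht]; simp
  · intro hmem
    obtain ⟨i, hi, hget⟩ := List.getElem_of_mem hmem
    have hip : i < (PySem.Chars.find cs ['(']).toNat := by
      simp [List.length_take] at hi; omega
    have hilen : i < cs.length := by
      simp [List.length_take] at hi; omega
    apply hmin i hip
    have hdropi : cs.drop i = cs[i] :: cs.drop (i + 1) := List.drop_eq_getElem_cons hilen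
    have hci : cs[i] = '(' := by
      rw [List.getElem_take] at hget; exact hget
    rw [hdropi, hci]
    exact ⟨cs.drop (i + 1), rfl⟩

theorem pv_find_cons_close (rest : List Char) (h : ')' ∈ rest) :
    PySem.Chars.find ('(' :: rest) [')'] = PySem.Chars.find rest [')'] + 1 := by
  have hinf : [')'] <:+: rest := (List.singleton_infix_iff _ _).2 h
  have hj : 0 ≤ PySem.Chars.find rest [')'] := (PySem.Chars.find_nonneg_iff _ _).2 hinf
  have hf : 0 ≤ PySem.Chars.find ('(' :: rest) [')'] :=
    (PySem.Chars.find_nonneg_iff _ _).2 ((List.singleton_infix_iff _ _).2 (List.mem_cons_of_mem _ h))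
  obtain ⟨hjp, hjmin⟩ := PySem.Chars.find_spec hj
  obtain ⟨hfp, hfmin⟩ := PySem.Chars.find_spec hf
  set j := (PySem.Chars.find rest [')']).toNat with hjdef
  set f := (PySem.Chars.find ('(' :: rest) [')']).toNat with hfdef
  have hf0 : f ≠ 0 := by
    intro h0
    rw [h0] at hfp
    simp at hfp
  obtain ⟨k, hk⟩ : ∃ k, f = k + 1 := ⟨f - 1, by omega⟩
  have hdropf : List.drop f ('(' :: rest) = List.drop k rest := by rw [hk]; simp
  -- prefix at k in rest
  have hpk : [')'] <+: List.drop k rest := by rw [← hdropf]; exact hfp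
  have h1 : j ≤ k := by
    by_contra hlt
    exact hjmin k (by omega) hpk
  have h2 : k ≤ j := by
    by_contra hlt
    exact hfmin (j + 1) (by omega) (by simpa using hjp)
  have heq : f = j + 1 := by omega
  rw [← Int.toNat_of_nonneg hf, ← Int.toNat_of_nonneg hj]
  exact_mod_cast heq

-- one removal step: A's rebuilt string (in both of A's forms) and its relation to B's scan
theorem pv_reduce (cs : List Char) (hok : pvParOK cs = true)
    (hcond : (PySem.Chars.isIn ['('] cs && PySem.Chars.isIn [')'] cs) = true) :
    ∃ cs' : List Char,
      PySem.Chars.slice cs none (some (PySem.Chars.find cs ['('])) ++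
        PySem.Chars.slice cs (some (PySem.Chars.findFrom cs [')'] (PySem.Chars.find cs ['(']) + 1)) none = cs' ∧
      PySem.Chars.slice cs none (some (PySem.Chars.find cs ['('] + 1 - 1)) ++
        PySem.Chars.slice cs (some (PySem.Chars.findFrom cs [')'] (PySem.Chars.find cs ['('] + 1) + 1)) none = cs' ∧
      pvParOK cs' = true ∧ cs'.length < cs.length ∧ pvScanB cs' = pvScanB cs := by
  have hopen : PySem.Chars.isIn ['('] cs = true := by
    simp only [Bool.and_eq_true] at hcond; exact hcond.1
  obtain ⟨p, hdp, hnp, hfind⟩ := pv_find_open cs hopen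
  have hplen : p < cs.length := by
    have hne : cs.drop p ≠ [] := by rw [hdp]; simp
    rw [ne_eq, List.drop_eq_nil_iff] at hne; omega
  set rest := cs.drop (p + 1) with hrest
  have hcs : cs = cs.take p ++ '(' :: rest := by
    conv_lhs => rw [← List.take_append_drop p cs]
    rw [hdp]
  have hokc : pvParOK ('(' :: rest) = true := by
    rw [hcs, pv_parOK_append _ _ hnp] at hok; exact hok
  have hmem : ')' ∈ rest := by
    simp [pvParOK] at hokc; exact hokc.1
  have hokrest : pvParOK rest = true := pv_parOK_tail _ _ hokc
  have hj0 : 0 ≤ PySem.Chars.find rest [')'] :=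
    (PySem.Chars.find_nonneg_iff _ _).2 ((List.singleton_infix_iff _ _).2 hmem)
  set jn := (PySem.Chars.find rest [')']).toNat with hjn
  have hjcast : PySem.Chars.find rest [')'] = (jn : Int) := (Int.toNat_of_nonneg hj0).symm
  have hlencs : cs.length = p + 1 + rest.length := by
    conv_lhs => rw [hcs]
    simp [List.length_take]
    omega
  have hffp : PySem.Chars.findFrom cs [')'] (p : Int) = (p : Int) + ((jn : Int) + 1) := by
    rw [PySem.Chars.findFrom_natCast cs [')'] p hplen.le, hdp, pv_find_cons_close rest hmem, hjcast,
      if_neg (by omega)]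
  have hffp1 : PySem.Chars.findFrom cs [')'] ((p : Int) + 1) = ((p : Int) + 1) + (jn : Int) := by
    have hc : ((p : Int) + 1) = ((p + 1 : Nat) : Int) := by push_cast; ring
    rw [hc, PySem.Chars.findFrom_natCast cs [')'] (p + 1) (by omega), ← hrest, hjcast,
      if_neg (by omega)]
  have hdropeq : cs.drop (p + jn + 2) = rest.drop (jn + 1) := by
    rw [hrest, List.drop_drop]
    congr 1
    omega
  refine ⟨cs.take p ++ rest.drop (jn + 1), ?_, ?_, ?_, ?_, ?_⟩
  · rw [hfind, hffp]
    have e1 : (p : Int) + ((jn : Int) + 1) + 1 = ((p + jn + 2 : Nat) : Int) := by push_cast; ring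
    rw [e1]
    simp only [PySem.Chars.slice_eq_listSlice, PySem.List.slice_to_natCast,
      PySem.List.slice_from_natCast]
    rw [hdropeq]
  · rw [hfind, hffp1]
    have e0 : (p : Int) + 1 - 1 = ((p : Nat) : Int) := by ring
    have e1 : (p : Int) + 1 + (jn : Int) + 1 = ((p + jn + 2 : Nat) : Int) := by push_cast; ring
    rw [e0, e1]
    simp only [PySem.Chars.slice_eq_listSlice, PySem.List.slice_to_natCast,
      PySem.List.slice_from_natCast]
    rw [hdropeq]
  · rw [pv_parOK_append _ _ hnp]
    exact pv_parOK_drop rest (jn + 1) hokrest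
  · have h1 : (cs.take p).length = p := by simp [List.length_take]; omega
    have h2 : (rest.drop (jn + 1)).length = rest.length - (jn + 1) := by simp
    simp only [List.length_append, h1, h2]
    omega
  · rw [pv_scan_append _ _ hnp]
    conv_rhs => rw [hcs, pv_scan_append _ _ hnp]
    congr 1
    have hne : ¬((jn : Int) = -1) := by omega
    simp [pvScanB, hjcast, hne]

theorem pv_whileA_stop (fuel : Nat) (cs : List Char)
    (hcond : ¬ (PySem.Chars.isIn ['('] cs && PySem.Chars.isIn [')'] cs) = true) :
    pvWhileA fuel cs = cs := by
  cases fuel <;> simp [pvWhileA, hcond]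

theorem pv_parOK_mem (l₁ l₂ : List Char) (h : pvParOK (l₁ ++ '(' :: l₂) = true) :
    ')' ∈ l₂ := by
  induction l₁ with
  | nil =>
    simp [pvParOK] at h
    exact h.1
  | cons c l₁ ih => exact ih (pv_parOK_tail _ _ h)

theorem pv_no_open_of_not_cond (cs : List Char) (hok : pvParOK cs = true)
    (hcond : ¬ (PySem.Chars.isIn ['('] cs && PySem.Chars.isIn [')'] cs) = true) :
    '(' ∉ cs := by
  intro hmem
  obtain ⟨l₁, l₂, rfl⟩ := List.append_of_mem hmem
  have h2 : ')' ∈ l₂ := pv_parOK_mem l₁ l₂ hok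
  apply hcond
  simp only [Bool.and_eq_true]
  exact ⟨(pv_isIn_singleton _ _).2 hmem, (pv_isIn_singleton _ _).2 (by simp [h2])⟩

theorem pv_main (fuel : Nat) : ∀ cs : List Char, pvParOK cs = true → cs.length ≤ fuel →
    pvWhileA fuel cs = pvScanB cs := by
  induction fuel with
  | zero =>
    intro cs _ hlen
    have : cs = [] := List.eq_nil_of_length_eq_zero (Nat.le_zero.1 hlen)
    subst this; simp [pvWhileA, pvScanB]
  | succ fuel ih =>
    intro cs hok hlen
    by_cases hcond : (PySem.Chars.isIn ['('] cs && PySem.Chars.isIn [')'] cs) = true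
    · obtain ⟨cs', h1, _, hok', hlt, hscan⟩ := pv_reduce cs hok hcond
      have : pvWhileA (fuel + 1) cs = pvWhileA fuel cs' := by
        simp only [pvWhileA, hcond, if_pos]; rw [h1]
      rw [this, ih cs' hok' (by omega), hscan]
    · rw [pv_whileA_stop _ _ hcond,
        pv_scan_no_open cs (pv_no_open_of_not_cond cs hok hcond)]

theorem pv_step (s : String) (h : pvGood s = true) :
    pvStepA s = pvStepB s := by
  unfold pvStepA pvStepB
  by_cases hcond : (PySem.Chars.isIn ['('] s.toList && PySem.Chars.isIn [')'] s.toList) = true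
  · have hok : pvParOK s.toList = true := by
      unfold pvGood at h
      simp only [hcond, Bool.not_true, Bool.false_or, Bool.and_eq_true] at h
      exact h.1
    obtain ⟨cs', _, h2, hok', hlt, hscan⟩ := pv_reduce s.toList hok hcond
    simp only [hcond, if_pos]
    rw [h2, pv_main cs'.length cs' hok' le_rfl, hscan]
  · simp only [hcond, Bool.false_eq_true, if_false]
    rw [pv_whileA_stop _ _ hcond]
-- ===== VERDICT (by name: the statement is the Claim_ definition above) =====
theorem create_qty_list_spec : Claim_equal_create_qty_list := by
  intro txt_items qty_list _ hPre
  unfold Spec_create_qty_list create_qty_list create_qty_list_alt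
  rw [PySem.List.foldl_append_singleton_eq_map]
  exact List.map_congr_left (fun s hs => pv_step s (hPre s hs))
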